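-- pv_equiv track=rewrite | github.com/Felix-Thiele/Tree-Proof-Assistant | Math_Logic/ParseStr.py | split_presumptions
-- ===== SOURCE A (Python) =====
-- def split_presumptions(statestr):
--     dict = {"[": "existential", "{": "universal"}
--     statements, types = [], []
--     index, len_statestr = 0, len(statestr)
--     while index < len_statestr:
--         if statestr[index] in ["[", "{"]:
--             close = find_closing_bracket(statestr, index)
--             statements.append(statestr[index+1:close])
--             types.append(dict[statestr[index]])
--             statestr = statestr[close+1:]
--             index, len_statestr = -1, len(statestr)
--         index += 1
--     if statestr != "":
--         statements.append(statestr)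
--         types.append("claim")
--     return statements, types
--
-- def find_closing_bracket(str, open_index):
--     br_open = str[open_index]
--     assert br_open in ["[", "(", "{"], "given char is not a bracket"
--     dict = {"[": "]", "(": ")", "{": "}"}
--     br_close = dict[br_open]
--     count = 0
--     for index, char in enumerate(str[open_index:]):
--         if char == br_open:
--             count += 1
--         elif char == br_close:
--             count -= 1
--         if count == 0:
--             return index + open_index
-- ===== SOURCE B (Python) =====
-- def split_presumptions(statestr):
--     kinds = {"[": ("]", "existential"), "{": ("}", "universal")}
--     statements, types = [], []
--     n = len(statestr)
--     i = 0
--     tail = 0  # start of the text after the last processed section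
--     while i < n:
--         c = statestr[i]
--         if c in kinds:
--             close_ch, kind = kinds[c]
--             depth = 1
--             j = i + 1
--             while depth:
--                 ch = statestr[j]
--                 if ch == c:
--                     depth += 1
--                 elif ch == close_ch:
--                     depth -= 1
--                 j += 1
--             statements.append(statestr[i + 1:j - 1])
--             types.append(kind)
--             i = j
--             tail = j
--         else:
--             i += 1
--     if tail < n:
--         statements.append(statestr[tail:])
--         types.append("claim")
--     return statements, types
-- ===== Notes on version B (the rewrite author's own statement) =====
-- stated objective: alternative
-- what changed: Replaces A's restart-and-reslice loop (on every bracket A copies the remaining string and rescans it from index 0) by a single left-to-right pass over the original string with an index pointer and a depth counter, so no string is ever re-sliced or rescanned.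
import Mathlib
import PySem

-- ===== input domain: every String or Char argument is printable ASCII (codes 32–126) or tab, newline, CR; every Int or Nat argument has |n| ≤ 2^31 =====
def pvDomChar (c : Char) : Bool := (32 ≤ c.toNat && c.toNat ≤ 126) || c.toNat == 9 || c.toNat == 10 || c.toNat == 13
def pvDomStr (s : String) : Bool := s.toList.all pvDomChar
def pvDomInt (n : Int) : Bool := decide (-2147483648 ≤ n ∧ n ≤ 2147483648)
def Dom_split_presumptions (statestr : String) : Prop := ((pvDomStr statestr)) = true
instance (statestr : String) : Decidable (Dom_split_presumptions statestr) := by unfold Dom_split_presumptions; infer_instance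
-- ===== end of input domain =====

-- B replaces A's restart-and-reslice loop by a single left-to-right pass with an index
-- pointer and a depth counter (objective: alternative — no string is re-sliced or rescanned).

-- ===== PORT A =====
-- port of find_closing_bracket's 'for index, char in enumerate(str[open_index:])' loop;
-- returns the index RELATIVE to open_index (the caller adds open_index back, as Python's
-- 'return index + open_index' does)
def fcbGo (brOpen brClose : Char) : List Char → Nat → Int → Option Nat
  | [], _, _ => none
  | c :: rest, idx, count =>
    let count' := if c = brOpen then count + 1 else if c = brClose then count - 1 else count
    if count' = 0 then some idx else fcbGo brOpen brClose rest (idx + 1) count'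

-- port of find_closing_bracket (none where Python's implicit 'return None' happens)
def pvFindClose (s : List Char) (openIdx : Nat) : Option Nat :=
  let brOpen := s.getD openIdx ' '
  let brClose := if brOpen = '[' then ']' else if brOpen = '(' then ')' else '}'
  (fcbGo brOpen brClose (s.drop openIdx) 0 0).map (· + openIdx)

-- port of A's while loop.  The first Nat is fuel making the recursion structural; the
-- entry point passes length+1 fuel, which always suffices (each iteration strictly
-- shrinks length - index), so the fuel-0 branch is never reached.  On inputs where
-- Python raises (find_closing_bracket returned None) the port returns the lists
-- accumulated so far (outside Pre_).
def loopA : Nat → List String → List String → List Char → Nat → List String × List String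
  | 0, stmts, types, _, _ => (stmts, types)
  | f + 1, stmts, types, s, index =>
    if index < s.length then
      let c := s.getD index ' '
      if c = '[' ∨ c = '{' then
        match pvFindClose s index with
        | none => (stmts, types)
        | some close =>
          loopA f (stmts ++ [String.ofList ((s.take close).drop (index + 1))])
            (types ++ [if c = '[' then "existential" else "universal"])
            (s.drop (close + 1)) 0
      else loopA f stmts types s (index + 1)
    else
      if s ≠ [] then (stmts ++ [String.ofList s], types ++ ["claim"]) else (stmts, types)

def split_presumptions (statestr : String) : List String × List String :=
  loopA (statestr.toList.length + 1) [] [] statestr.toList 0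

-- ===== PORT B =====
-- port of B's inner 'while depth:' scan (depth counter, index pointer); fuel-structural,
-- called with length+1 fuel which always suffices; none = Python's IndexError
def scanB (brOpen brClose : Char) (s : List Char) : Nat → Nat → Int → Option Nat
  | 0, _, _ => none
  | f + 1, j, depth =>
    if j < s.length then
      let ch := s.getD j ' '
      let depth' := if ch = brOpen then depth + 1 else if ch = brClose then depth - 1 else depth
      if depth' = 0 then some (j + 1) else scanB brOpen brClose s f (j + 1) depth'
    else none

-- port of B's outer while loop (i scans, tail marks the end of the last section);
-- fuel-structural like loopA
def loopB (s : List Char) : Nat → Nat → Nat → List String → List String → List String × List String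
  | 0, _, _, stmts, types => (stmts, types)
  | f + 1, i, tail, stmts, types =>
    if i < s.length then
      let c := s.getD i ' '
      if c = '[' ∨ c = '{' then
        let cl := if c = '[' then ']' else '}'
        match scanB c cl s (s.length + 1) (i + 1) 1 with
        | none => (stmts, types)
        | some j =>
          loopB s f j j (stmts ++ [String.ofList ((s.take (j - 1)).drop (i + 1))])
            (types ++ [if c = '[' then "existential" else "universal"])
      else loopB s f (i + 1) tail stmts types
    else
      if tail < s.length then (stmts ++ [String.ofList (s.drop tail)], types ++ ["claim"])
      else (stmts, types)

def split_presumptions_alt (statestr : String) : List String × List String :=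
  loopB statestr.toList (statestr.toList.length + 1) 0 0 [] []

-- ===== PRECONDITION & SPEC =====
-- Structural shape predicate for Pre_: the string is a sequence of well-closed top-level
-- quantifier sections (each reached '[' / '{' has a later position balancing the counts of
-- its open and close characters), possibly followed by plain text.  Stated declaratively
-- via first-occurrence search and prefix counts, not via either port's scan.
def secOKAux : Nat → List Char → Bool
  | 0, _ => true
  | n + 1, s =>
    match s.findIdx? (fun c => c == '[' || c == '{') with
    | none => true
    | some p =>
      let o := s.getD p ' '
      let cl := if o = '[' then ']' else '}'
      let t := s.drop p
      match (List.range t.length).find?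
          (fun q => (t.take (q + 1)).count o == (t.take (q + 1)).count cl) with
      | none => false
      | some q => secOKAux n (s.drop (p + q + 1))

-- the Nat argument (passed s.length, an upper bound on the number of sections) only makes
-- the recursion structural; each step drops at least two characters, so it never runs out
def secOK (s : List Char) : Bool := secOKAux s.length s

-- Pre_ holds exactly on the inputs where Python A returns normally: every top-level
-- quantifier bracket it reaches has a matching close.  Outside Pre_ A raises (TypeError,
-- from slicing with the None returned by find_closing_bracket) and B raises IndexError.
def Pre_split_presumptions (statestr : String) : Prop := secOK statestr.toList = true
instance (statestr : String) : Decidable (Pre_split_presumptions statestr) := by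
  unfold Pre_split_presumptions; infer_instance

def pvWitness_split_presumptions : String := "[x]{y(}c"

def Spec_split_presumptions (statestr : String) (out : List String × List String) : Prop := out = split_presumptions_alt statestr
instance (statestr : String) (out : List String × List String) : Decidable (Spec_split_presumptions statestr out) := by unfold Spec_split_presumptions; infer_instance

-- ===== CLAIM (what is proved, stated in full; the proofs are below) =====
def Claim_equal_split_presumptions : Prop := ∀ (statestr : String), Dom_split_presumptions statestr → Pre_split_presumptions statestr → Spec_split_presumptions statestr (split_presumptions statestr)

-- ===== LEMMAS AND PROOFS =====

-- fcbGo only shifts its index accumulator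
theorem fcbGo_shift (brOpen brClose : Char) :
    ∀ (l : List Char) (idx : Nat) (d : Int),
      fcbGo brOpen brClose l idx d = (fcbGo brOpen brClose l 0 d).map (· + idx) := by
  intro l
  induction l with
  | nil => intro idx d; simp [fcbGo]
  | cons c rest ih =>
    intro idx d
    simp only [fcbGo]
    by_cases h : (if c = brOpen then d + 1 else if c = brClose then d - 1 else d) = 0
    · simp [h]
    · simp only [if_neg h]
      rw [ih (idx + 1), ih 1]
      cases fcbGo brOpen brClose rest 0 (if c = brOpen then d + 1 else if c = brClose then d - 1 else d) with
      | none => simp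
      | some r => simp; omega

-- B's index-pointer scan computes the same closing position as A's enumerate scan
theorem scanB_eq_fcbGo (brOpen brClose : Char) (s : List Char) :
    ∀ (f j : Nat) (d : Int), s.length - j < f →
      scanB brOpen brClose s f j d = (fcbGo brOpen brClose (s.drop j) 0 d).map (fun r => j + r + 1) := by
  intro f
  induction f with
  | zero => intro j d hf; omega
  | succ f ih =>
    intro j d hf
    rw [scanB]
    by_cases hj : j < s.length
    · rw [if_pos hj, List.drop_eq_getElem_cons hj]
      have hch : s.getD j ' ' = s[j] := by
        simp [List.getD_eq_getElem?_getD, List.getElem?_eq_getElem hj]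
      simp only [fcbGo, hch]
      by_cases hz : (if s[j] = brOpen then d + 1 else if s[j] = brClose then d - 1 else d) = 0
      · simp [hz]
      · simp only [if_neg hz]
        rw [ih (j + 1) _ (by omega), fcbGo_shift brOpen brClose (s.drop (j + 1)) 1]
        cases fcbGo brOpen brClose (s.drop (j + 1)) 0
            (if s[j] = brOpen then d + 1 else if s[j] = brClose then d - 1 else d) with
        | none => simp
        | some r => simp; omega
    · rw [if_neg hj, List.drop_eq_nil_iff.mpr (by omega)]
      simp [fcbGo]

-- the main bridge: A restarted on the cut string equals B with an absolute pointer
theorem bridge (s : List Char) :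
    ∀ (f1 f2 tail idx : Nat) (stmts types : List String),
      (s.drop tail).length - idx < f1 → s.length - (tail + idx) < f2 →
      loopA f1 stmts types (s.drop tail) idx = loopB s f2 (tail + idx) tail stmts types := by
  intro f1
  induction f1 with
  | zero => intro f2 tail idx stmts types h1 h2; omega
  | succ f1 ih =>
    intro f2 tail idx stmts types hf1 hf2
    cases f2 with
    | zero => omega
    | succ f2 =>
      rw [loopA, loopB]
      by_cases h2 : tail + idx < s.length
      · rw [if_pos (by simp; omega : idx < (s.drop tail).length), if_pos h2]
        have hc : (s.drop tail).getD idx ' ' = s.getD (tail + idx) ' ' := by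
          simp [List.getD_eq_getElem?_getD, List.getElem?_drop]
        have hg : s.getD (tail + idx) ' ' = s[tail + idx] := by
          simp [List.getD_eq_getElem?_getD, List.getElem?_eq_getElem h2]
        simp only [hc]
        by_cases hbr : s.getD (tail + idx) ' ' = '[' ∨ s.getD (tail + idx) ' ' = '{'
        · rw [if_pos hbr, if_pos hbr]
          have hdd : (s.drop tail).drop idx = s.drop (tail + idx) := by
            rw [List.drop_drop]
          have hcons : s.drop (tail + idx) = s.getD (tail + idx) ' ' :: s.drop (tail + idx + 1) := by
            rw [hg]; exact List.drop_eq_getElem_cons h2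
          have hclch : (if s.getD (tail + idx) ' ' = '[' then ']'
              else if s.getD (tail + idx) ' ' = '(' then ')' else '}') =
              (if s.getD (tail + idx) ' ' = '[' then ']' else '}') := by
            rcases hbr with h | h <;> rw [h] <;> simp
          have hfc : pvFindClose (s.drop tail) idx =
              (fcbGo (s.getD (tail + idx) ' ') (if s.getD (tail + idx) ' ' = '[' then ']' else '}')
                (s.drop (tail + idx + 1)) 1 1).map (· + idx) := by
            unfold pvFindClose
            dsimp only
            rw [hc, hclch, hdd, hcons]
            simp [fcbGo]
          have hsc : scanB (s.getD (tail + idx) ' ')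
              (if s.getD (tail + idx) ' ' = '[' then ']' else '}') s (s.length + 1) (tail + idx + 1) 1 =
              (fcbGo (s.getD (tail + idx) ' ') (if s.getD (tail + idx) ' ' = '[' then ']' else '}')
                (s.drop (tail + idx + 1)) 0 1).map (fun r => tail + idx + 1 + r + 1) :=
            scanB_eq_fcbGo _ _ s _ _ _ (by omega)
          rw [hfc, hsc, fcbGo_shift (s.getD (tail + idx) ' ') _ (s.drop (tail + idx + 1)) 1]
          cases hF : fcbGo (s.getD (tail + idx) ' ')
              (if s.getD (tail + idx) ' ' = '[' then ']' else '}')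
              (s.drop (tail + idx + 1)) 0 1 with
          | none => simp
          | some r =>
            simp only [Option.map_some]
            have hstA : ((s.drop tail).take (r + 1 + idx)).drop (idx + 1) =
                (s.drop (tail + idx + 1)).take r := by
              rw [List.drop_take, List.drop_drop]
              congr 1 <;> omega
            have hstB : (s.take (tail + idx + 1 + r + 1 - 1)).drop (tail + idx + 1) =
                (s.drop (tail + idx + 1)).take r := by
              rw [List.drop_take]
              congr 1
              omega
            have hnew : (s.drop tail).drop (r + 1 + idx + 1) = s.drop (tail + idx + r + 2) := by
              rw [List.drop_drop]; congr 1; omega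
            rw [hstA, hstB, hnew, (by omega : tail + idx + 1 + r + 1 = tail + idx + r + 2)]
            have hf1' : s.length - tail - idx < f1 + 1 := by simpa using hf1
            have := ih f2 (tail + idx + r + 2) 0
              (stmts ++ [String.ofList ((s.drop (tail + idx + 1)).take r)])
              (types ++ [if s.getD (tail + idx) ' ' = '[' then "existential" else "universal"])
              (by simp; omega) (by omega)
            rw [Nat.add_zero] at this
            exact this
        · rw [if_neg hbr, if_neg hbr]
          have := ih f2 tail (idx + 1) stmts types (by simp at hf1 ⊢; omega) (by omega)
          rw [← Nat.add_assoc] at this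
          exact this
      · rw [if_neg (by simp; omega : ¬ idx < (s.drop tail).length), if_neg h2]
        have h3 : (s.drop tail ≠ []) ↔ tail < s.length := by
          rw [ne_eq, List.drop_eq_nil_iff]; omega
        by_cases ht : tail < s.length
        · rw [if_pos (h3.mpr ht), if_pos ht]
        · rw [if_neg (fun hh => ht (h3.mp hh)), if_neg ht]

theorem total_eq (statestr : String) :
    split_presumptions statestr = split_presumptions_alt statestr := by
  unfold split_presumptions split_presumptions_alt
  have := bridge statestr.toList (statestr.toList.length + 1) (statestr.toList.length + 1)
    0 0 [] [] (by simp) (by omega)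
  simpa using this

-- ===== VERDICT (by name: the statement is the Claim_ definition above) =====
theorem split_presumptions_spec : Claim_equal_split_presumptions := by
  intro s _ _
  exact total_eq s
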